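-- pv_equiv track=rewrite | github.com/juanary/Trabajos-AED | TP2.py | identificacion_destinatario
-- ===== SOURCE A (Python) =====
-- def identificacion_destinatario(intervalo, indice=0):
--     limite = len(intervalo)
--
--     if indice >= limite:
--         return True  # Caso base: todos los caracteres fueron válidos
--
--     letra = intervalo[indice]
--     if letra in "ABCDEFGHIJKLMNÑOPQRSTUVWXYZ0123456789-_":
--         return identificacion_destinatario(intervalo, indice + 1)
--     else:
--         return False
-- ===== SOURCE B (Python) =====
-- def identificacion_destinatario(intervalo, indice=0):
--     return all(intervalo[i] in "ABCDEFGHIJKLMNÑOPQRSTUVWXYZ0123456789-_"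
--                for i in range(indice, len(intervalo)))
-- ===== Notes on version B (the rewrite author's own statement) =====
-- stated objective: idiomatic
-- what changed: Replaces the explicit tail recursion over an advancing index with a single all(...) over range(indice, len(intervalo)), keeping the same per-index access and membership test so negative and oversized indices behave identically.
import Mathlib
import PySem

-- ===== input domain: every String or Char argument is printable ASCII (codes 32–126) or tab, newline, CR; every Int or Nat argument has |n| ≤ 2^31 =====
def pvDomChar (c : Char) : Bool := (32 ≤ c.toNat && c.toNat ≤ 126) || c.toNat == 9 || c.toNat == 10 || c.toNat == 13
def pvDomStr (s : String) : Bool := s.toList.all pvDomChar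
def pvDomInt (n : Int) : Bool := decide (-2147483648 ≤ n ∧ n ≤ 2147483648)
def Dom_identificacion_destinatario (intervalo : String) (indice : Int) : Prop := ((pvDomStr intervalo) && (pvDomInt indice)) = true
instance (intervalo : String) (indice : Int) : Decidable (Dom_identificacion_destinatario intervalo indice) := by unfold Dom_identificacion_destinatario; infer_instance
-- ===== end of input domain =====

-- B replaces A's tail recursion with an all(...) over range(indice, len(intervalo)); same per-index access and membership test (objective: idiomatic).

-- ===== PORT A =====
-- literal port of A's recursion; pyGet? = none is Python's IndexError (excluded by Pre_)
def identificacion_destinatario (intervalo : String) (indice : Int) : Bool :=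
  let limite : Int := PySem.Str.len intervalo
  if _h : indice ≥ limite then true
  else
    match PySem.Str.pyGet? intervalo indice with
    | none => false
    | some letra =>
      if PySem.Chars.isIn [letra] "ABCDEFGHIJKLMNÑOPQRSTUVWXYZ0123456789-_".toList then
        identificacion_destinatario intervalo (indice + 1)
      else false
termination_by (PySem.Str.len intervalo - indice).toNat
decreasing_by
  simp only [not_le] at _h
  omega

-- ===== PORT B =====
def identificacion_destinatario_alt (intervalo : String) (indice : Int) : Bool :=
  (PySem.List.pyRange indice (PySem.Str.len intervalo) 1).all
    (fun i => match PySem.Str.pyGet? intervalo i with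
      | none => false
      | some c => "ABCDEFGHIJKLMNÑOPQRSTUVWXYZ0123456789-_".toList.contains c)

-- ===== PRECONDITION & SPEC =====
-- Pre_ excludes exactly the inputs where the Pythons raise IndexError: indice < -len(intervalo)
def Pre_identificacion_destinatario (intervalo : String) (indice : Int) : Prop :=
  -(PySem.Str.len intervalo) ≤ indice
instance (intervalo : String) (indice : Int) : Decidable (Pre_identificacion_destinatario intervalo indice) := by unfold Pre_identificacion_destinatario; infer_instance
def pvWitness_identificacion_destinatario : String × Int := ("AB-9_Z", 0)
def Spec_identificacion_destinatario (intervalo : String) (indice : Int) (out : Bool) : Prop := out = identificacion_destinatario_alt intervalo indice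
instance (intervalo : String) (indice : Int) (out : Bool) : Decidable (Spec_identificacion_destinatario intervalo indice out) := by unfold Spec_identificacion_destinatario; infer_instance

-- ===== CLAIM (what is proved, stated in full; the proofs are below) =====
def Claim_equal_identificacion_destinatario : Prop := ∀ (intervalo : String) (indice : Int), Dom_identificacion_destinatario intervalo indice → Pre_identificacion_destinatario intervalo indice → Spec_identificacion_destinatario intervalo indice (identificacion_destinatario intervalo indice)

-- ===== LEMMAS AND PROOFS =====

-- the single-char membership tests of the two ports agree
theorem pv_mem_eq (c : Char) (cs : List Char) :
    PySem.Chars.isIn [c] cs = cs.contains c := by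
  rcases h : cs.contains c with _ | _
  · rw [PySem.Chars.isIn_eq_false_iff]
    intro hinf
    have : c ∈ cs := hinf.subset (by simp)
    simp_all
  · have hc : c ∈ cs := by simpa using h
    obtain ⟨l, r, rfl⟩ := List.mem_iff_append.mp hc
    exact (PySem.Chars.isIn_iff_infix _ _).mpr ⟨l, r, by simp⟩

theorem pv_eq (intervalo : String) : ∀ (n : Nat) (indice : Int),
    (PySem.Str.len intervalo - indice).toNat = n →
    identificacion_destinatario intervalo indice = identificacion_destinatario_alt intervalo indice := by
  intro n
  induction n with
  | zero =>
    intro i h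
    have hge : PySem.Str.len intervalo ≤ i := by omega
    rw [identificacion_destinatario]
    simp only [hge]
    unfold identificacion_destinatario_alt
    rw [PySem.List.pyRange_one_eq_nil hge]
    rfl
  | succ n ih =>
    intro i h
    have hlt : i < PySem.Str.len intervalo := by omega
    rw [identificacion_destinatario]
    simp only [ge_iff_le, not_le.mpr hlt]
    unfold identificacion_destinatario_alt
    rw [PySem.List.pyRange_one_cons hlt, List.all_cons]
    cases hg : PySem.Str.pyGet? intervalo i with
    | none => simp
    | some c =>
      simp only [hg]
      rw [pv_mem_eq]
      cases hm : ("ABCDEFGHIJKLMNÑOPQRSTUVWXYZ0123456789-_".toList.contains c) with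
      | false => simp
      | true =>
        simp only [Bool.true_and]
        have := ih (i + 1) (by omega)
        unfold identificacion_destinatario_alt at this
        simpa [hm] using this

-- ===== VERDICT (by name: the statement is the Claim_ definition above) =====
theorem identificacion_destinatario_spec : Claim_equal_identificacion_destinatario := by
  intro intervalo indice _ _
  unfold Spec_identificacion_destinatario
  exact pv_eq intervalo _ indice rfl
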